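-- pv_equiv track=rewrite | github.com/agoodusernam/shitass-PQ-chat | utils/vc_utils.py | negotiate_audio_format
-- ===== SOURCE A (Python) =====
-- def format_rank_map() -> dict[int, int]:
--     """Return a map from PyAudio format constant to a rank (higher is better)."""
--     # Numeric constants for pyaudio formats
--     # paFloat32 = 1, paInt32 = 2, paInt24 = 4, paInt16 = 8, paInt8 = 16, paUInt8 = 32
--     return {
--         32: 0,  # paUInt8
--         16: 1,  # paInt8
--         8:  2,  # paInt16
--         4:  3,  # paInt24
--         2:  4,  # paInt32
--         1:  5,  # paFloat32
--     }
--
-- def negotiate_audio_format(self_max: int, other_max: int) -> int: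
--     """
--     Given this client's MAX format and the other's MAX format, return the highest
--     format both support. This is the lower of the two maxima in rank order.
--     """
--     rank = format_rank_map()
--     # Default to int16 (8) if unknown
--     default_fmt = 8
--     self_rank = rank.get(int(self_max), rank.get(default_fmt, 2))
--     other_rank = rank.get(int(other_max), rank.get(default_fmt, 2))
--     agreed_rank = min(self_rank, other_rank)
--     # Find the format constant with this rank
--     for fmt, r in rank.items():
--         if r == agreed_rank:
--             return fmt
--     return default_fmt
-- ===== SOURCE B (Python) =====
-- def negotiate_audio_format(self_max: int, other_max: int) -> int:
--     """Rank is a strict inverse of the format constant, so the lower-ranked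
--     agreed format is simply the larger constant (unknown values fall back to 8)."""
--     KNOWN = {1, 2, 4, 8, 16, 32}
--     a = int(self_max)
--     b = int(other_max)
--     if a not in KNOWN:
--         a = 8
--     if b not in KNOWN:
--         b = 8
--     return max(a, b)
-- ===== Notes on version B (the rewrite author's own statement) =====
-- stated objective: simpler
-- what changed: Drops the rank dict and the linear scan back from rank to format: since rank is a strict inverse of the format constant, B normalizes each argument (unknown -> 8) and returns the larger constant with max.
import Mathlib
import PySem

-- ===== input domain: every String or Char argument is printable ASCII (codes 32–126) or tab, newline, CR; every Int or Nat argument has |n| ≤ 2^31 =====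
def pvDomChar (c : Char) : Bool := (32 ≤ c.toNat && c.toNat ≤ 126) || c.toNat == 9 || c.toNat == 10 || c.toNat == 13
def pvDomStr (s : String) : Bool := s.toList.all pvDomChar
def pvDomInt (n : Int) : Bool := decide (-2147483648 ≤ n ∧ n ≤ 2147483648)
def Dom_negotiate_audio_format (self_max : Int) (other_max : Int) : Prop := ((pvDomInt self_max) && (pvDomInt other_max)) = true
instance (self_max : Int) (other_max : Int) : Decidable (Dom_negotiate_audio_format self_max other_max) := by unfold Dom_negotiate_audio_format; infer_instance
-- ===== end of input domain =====

-- B drops A's rank dict and scan: rank is a strict inverse of the constant, so the agreed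
-- (lower-ranked) format is just the max of the two normalized constants. Objective: simpler.

-- ===== PORT A =====
-- format_rank_map(): literal dict {32:0, 16:1, 8:2, 4:3, 2:4, 1:5}
def format_rank_map : PySem.Dict Int Int :=
  PySem.Dict.ofList [(32, 0), (16, 1), (8, 2), (4, 3), (2, 4), (1, 5)]

-- the for-loop over rank.items(): first (fmt, r) with r == agreed_rank, else default 8
def negotiate_scan : List (Int × Int) → Int → Int
  | [], _ => 8
  | (fmt, r) :: rest, agreed => if r = agreed then fmt else negotiate_scan rest agreed

def negotiate_audio_format (self_max : Int) (other_max : Int) : Int :=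
  let rank := format_rank_map
  let default_fmt : Int := 8
  let self_rank := (rank.get? self_max).getD ((rank.get? default_fmt).getD 2)
  let other_rank := (rank.get? other_max).getD ((rank.get? default_fmt).getD 2)
  let agreed_rank := min self_rank other_rank
  negotiate_scan rank.items agreed_rank

-- ===== PORT B =====
-- normalize: v if v in {1,2,4,8,16,32} else 8
def norm_fmt (v : Int) : Int :=
  if v = 1 ∨ v = 2 ∨ v = 4 ∨ v = 8 ∨ v = 16 ∨ v = 32 then v else 8

def negotiate_audio_format_alt (self_max : Int) (other_max : Int) : Int :=
  max (norm_fmt self_max) (norm_fmt other_max)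

-- ===== PRECONDITION & SPEC =====
def Spec_negotiate_audio_format (self_max : Int) (other_max : Int) (out : Int) : Prop := out = negotiate_audio_format_alt self_max other_max
instance (self_max : Int) (other_max : Int) (out : Int) : Decidable (Spec_negotiate_audio_format self_max other_max out) := by unfold Spec_negotiate_audio_format; infer_instance

-- ===== CLAIM (what is proved, stated in full; the proofs are below) =====
def Claim_equal_negotiate_audio_format : Prop := ∀ (self_max : Int) (other_max : Int), Dom_negotiate_audio_format self_max other_max → Spec_negotiate_audio_format self_max other_max (negotiate_audio_format self_max other_max)

-- ===== LEMMAS AND PROOFS =====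

-- A's rank lookup with default equals the rank of B's normalized constant.
def rank_of (v : Int) : Int :=
  if v = 32 then 0 else if v = 16 then 1 else if v = 8 then 2
  else if v = 4 then 3 else if v = 2 then 4 else 5

theorem lookup_eq_rank_norm (v : Int) :
    ((format_rank_map.get? v).getD ((format_rank_map.get? 8).getD 2)) = rank_of (norm_fmt v) := by
  by_cases h1 : v = 1 <;> by_cases h2 : v = 2 <;> by_cases h4 : v = 4 <;>
    by_cases h8 : v = 8 <;> by_cases h16 : v = 16 <;> by_cases h32 : v = 32 <;>
    subst_vars <;>
    first
    | decide
    | simp_all [format_rank_map, norm_fmt, rank_of, PySem.Dict.ofList, PySem.Dict.get?,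
        PySem.Dict.update, PySem.Dict.insert, PySem.Dict.empty, PySem.Dict.contains,
        List.find?, beq_iff_eq] <;>
      (repeat' split) <;> simp_all

theorem scan_eq_max (a b : Int)
    (ha : a = 1 ∨ a = 2 ∨ a = 4 ∨ a = 8 ∨ a = 16 ∨ a = 32)
    (hb : b = 1 ∨ b = 2 ∨ b = 4 ∨ b = 8 ∨ b = 16 ∨ b = 32) :
    negotiate_scan format_rank_map.items (min (rank_of a) (rank_of b)) = max a b := by
  rcases ha with rfl | rfl | rfl | rfl | rfl | rfl <;>
    rcases hb with rfl | rfl | rfl | rfl | rfl | rfl <;> decide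

theorem norm_fmt_mem (v : Int) :
    norm_fmt v = 1 ∨ norm_fmt v = 2 ∨ norm_fmt v = 4 ∨ norm_fmt v = 8 ∨
    norm_fmt v = 16 ∨ norm_fmt v = 32 := by
  unfold norm_fmt; split_ifs with h
  · exact h.imp id (fun h => h.imp id (fun h => h.imp id (fun h => h.imp id id)))
  · tauto

-- ===== VERDICT (by name: the statement is the Claim_ definition above) =====
theorem negotiate_audio_format_spec : Claim_equal_negotiate_audio_format := by
  intro s o _
  unfold Spec_negotiate_audio_format negotiate_audio_format negotiate_audio_format_alt
  simp only [lookup_eq_rank_norm]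
  exact scan_eq_max _ _ (norm_fmt_mem s) (norm_fmt_mem o)
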